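-- pv_equiv track=rewrite | github.com/mileoa/beginner-course-continued | Карты,словари (dictionary,map)/task2.py | get_met_n
-- ===== SOURCE A (Python) =====
-- from typing import List, Dict
--
-- def get_met_n(array: List[int], n: int) -> List[int]:
--     # Считаем сколько раз встречается элемент.
--     elements_amount: Dict[int, int] = {}
--     result: List[int] = []
--     for i in array:
--         if elements_amount.get(i) is None:
--             elements_amount[i] = 1
--         else:
--             elements_amount[i] += 1
--         if elements_amount[i] == n:
--             result.append(i)
--
--     elements_amount = None
--     return result
-- ===== SOURCE B (Python) =====
-- from typing import List
--
--
-- def get_met_n(array: List[int], n: int) -> List[int]: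
--     # Stage 1: index every element by the list of positions where it occurs.
--     positions = {}
--     for idx, x in enumerate(array):
--         positions.setdefault(x, []).append(idx)
--     # Stage 2: for each element with at least n occurrences, take the position
--     # of its n-th occurrence; sort by that position to restore output order.
--     pairs = [(idxs[n - 1], x) for x, idxs in positions.items() if 1 <= n <= len(idxs)]
--     pairs.sort(key=lambda p: p[0])
--     return [x for _, x in pairs]
-- ===== Notes on version B (the rewrite author's own statement) =====
-- stated objective: alternative
-- what changed: Replaced A's single counting scan that emits inline with a staged positional index: group all occurrence positions per element into a dict, pick the n-th position of each qualifying element, and sort those positions to recover the output order.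
import Mathlib
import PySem

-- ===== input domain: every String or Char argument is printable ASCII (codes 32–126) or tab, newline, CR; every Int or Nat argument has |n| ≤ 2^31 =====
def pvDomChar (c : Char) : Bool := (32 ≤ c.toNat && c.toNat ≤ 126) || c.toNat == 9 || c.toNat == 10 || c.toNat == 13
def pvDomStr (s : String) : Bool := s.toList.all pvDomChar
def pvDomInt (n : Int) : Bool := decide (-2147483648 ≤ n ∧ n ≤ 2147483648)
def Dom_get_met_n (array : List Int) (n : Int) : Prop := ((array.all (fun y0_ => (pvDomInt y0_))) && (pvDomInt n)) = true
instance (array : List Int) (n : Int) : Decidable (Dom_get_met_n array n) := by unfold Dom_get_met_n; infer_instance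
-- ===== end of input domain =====

-- B replaces A's inline emit-while-counting scan by a staged positional index:
-- group occurrence positions per element, take each n-th position, sort by position (alternative, not faster).

-- ===== PORT A =====
-- one loop step: update the count of i, then append i to result iff its count just reached n
def pvStepA (n : Int) (st : PySem.Dict Int Int × List Int) (i : Int) : PySem.Dict Int Int × List Int :=
  let ea :=
    match st.1.get? i with
    | none => st.1.insert i 1
    | some _ => st.1.modify i 0 (· + 1)
  let res := if ea.getD i 0 == n then st.2 ++ [i] else st.2
  (ea, res)

def get_met_n (array : List Int) (n : Int) : List Int :=
  (array.foldl (pvStepA n) (PySem.Dict.empty, [])).2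

-- ===== PORT B =====
-- positions.setdefault(x, []).append(idx)  =  d.modify x [] (· ++ [idx]);
-- idxs[n-1] is evaluated only under the guard 1 ≤ n ≤ len idxs, where pyGetD is exact
def get_met_n_alt (array : List Int) (n : Int) : List Int :=
  let pos : PySem.Dict Int (List Int) :=
    (PySem.List.enumerate array).foldl (fun d p => d.modify p.2 [] (fun l => l ++ [p.1])) PySem.Dict.empty
  let pairs : List (Int × Int) :=
    pos.items.filterMap (fun q =>
      if 1 ≤ n ∧ n ≤ (q.2.length : Int) then some (PySem.List.pyGetD q.2 (n - 1) 0, q.1) else none)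
  (PySem.List.sorted pairs (fun p => p.1) false).map (fun p => p.2)

-- ===== PRECONDITION & SPEC =====
def Spec_get_met_n (array : List Int) (n : Int) (out : List Int) : Prop := out = get_met_n_alt array n
instance (array : List Int) (n : Int) (out : List Int) : Decidable (Spec_get_met_n array n out) := by unfold Spec_get_met_n; infer_instance

-- ===== CLAIM (what is proved, stated in full; the proofs are below) =====
def Claim_equal_get_met_n : Prop := ∀ (array : List Int) (n : Int), Dom_get_met_n array n → Spec_get_met_n array n (get_met_n array n)

-- ===== LEMMAS AND PROOFS =====

-- reference list of (position, element) pairs whose element's count within its own prefix equals n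
def pvRefP (n s : Int) (pre rest : List Int) : List (Int × Int) :=
  match rest with
  | [] => []
  | x :: rs => (if ((pre.count x : Int) + 1 == n) then [(s, x)] else []) ++ pvRefP n (s + 1) (pre ++ [x]) rs

lemma pvStepA_getD (n : Int) (st : PySem.Dict Int Int × List Int) (x v : Int) :
    (pvStepA n st x).1.getD v 0 = if v = x then st.1.getD x 0 + 1 else st.1.getD v 0 := by
  unfold pvStepA
  cases h : st.1.get? x with
  | none =>
      simp [PySem.Dict.getD_eq_get?_getD, PySem.Dict.get?_insert, h]
      split_ifs <;> simp
  | some c =>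
      simp only [PySem.Dict.getD_modify]

lemma pvLoopA (n : Int) (rest : List Int) : ∀ (s : Int) (pre : List Int) (d : PySem.Dict Int Int) (res : List Int),
    (∀ v, d.getD v 0 = (pre.count v : Int)) →
    (rest.foldl (pvStepA n) (d, res)).2 = res ++ (pvRefP n s pre rest).map (·.2) := by
  induction rest with
  | nil => intro s pre d res _; simp [pvRefP]
  | cons x rs ih =>
      intro s pre d res hd
      have hstep : ∀ v, (pvStepA n (d, res) x).1.getD v 0 = ((pre ++ [x]).count v : Int) := by
        intro v
        rw [pvStepA_getD]
        by_cases hv : v = x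
        · simp [hv, hd, List.count_append]
        · simp [hv, hd, List.count_append, Ne.symm hv]
      have hsnd : (pvStepA n (d, res) x).2 =
          if ((pre.count x : Int) + 1 == n) then res ++ [x] else res := by
        unfold pvStepA
        have : (pvStepA n (d, res) x).1.getD x 0 = (pre.count x : Int) + 1 := by
          rw [pvStepA_getD]; simp [hd]
        unfold pvStepA at this
        simp only [this]
      calc ((x :: rs).foldl (pvStepA n) (d, res)).2
          = (rs.foldl (pvStepA n) (pvStepA n (d, res) x)).2 := by rw [List.foldl_cons]
        _ = (pvStepA n (d, res) x).2 ++ (pvRefP n (s + 1) (pre ++ [x]) rs).map (·.2) := by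
            rw [← ih (s + 1) (pre ++ [x]) (pvStepA n (d, res) x).1 (pvStepA n (d, res) x).2 hstep]
        _ = res ++ (pvRefP n s pre (x :: rs)).map (·.2) := by
            rw [hsnd]
            simp only [pvRefP]
            split_ifs <;> simp

-- membership in pvRefP
lemma mem_pvRefP (n : Int) (rest : List Int) : ∀ (s : Int) (pre : List Int) (p : Int × Int),
    p ∈ pvRefP n s pre rest ↔
      ∃ k : Nat, ∃ hk : k < rest.length,
        p.1 = s + k ∧ p.2 = rest[k] ∧ ((pre.count rest[k] : Int) + ((rest.take (k + 1)).count rest[k] : Int)) = n := by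
  induction rest with
  | nil => intro s pre p; simp [pvRefP]
  | cons x rs ih =>
      intro s pre p
      have h1 : p ∈ pvRefP n s pre (x :: rs) ↔
          (((pre.count x : Int) + 1 = n) ∧ p = (s, x)) ∨ p ∈ pvRefP n (s + 1) (pre ++ [x]) rs := by
        simp only [pvRefP, List.mem_append]
        split_ifs with h
        · simp only [beq_iff_eq] at h; simp [h]
        · simp only [beq_iff_eq] at h; simp [h]
      rw [h1, ih]
      constructor
      · rintro (⟨hn, rfl⟩ | ⟨k, hk, h1, h2, h3⟩)
        · refine ⟨0, by simp, by simp, by simp, ?_⟩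
          simp
          omega
        · refine ⟨k + 1, by simp; omega, ?_, ?_, ?_⟩
          · push_cast; omega
          · simpa using h2
          · rw [List.getElem_cons_succ, List.take_succ_cons, List.count_cons]
            rw [List.count_append, List.count_singleton] at h3
            by_cases hx : rs[k] = x <;> simp [hx] at h3 ⊢ <;> omega
      · rintro ⟨k, hk, h1, h2, h3⟩
        cases k with
        | zero =>
            left
            simp only [List.getElem_cons_zero] at h2
            rw [List.take_succ_cons, List.take_zero] at h3
            simp at h3
            refine ⟨by omega, ?_⟩
            ext
            · simpa using h1
            · simpa using h2
        | succ k =>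
            right
            have hk' : k < rs.length := by simpa using hk
            refine ⟨k, hk', ?_, ?_, ?_⟩
            · push_cast at h1 ⊢; omega
            · simpa using h2
            · rw [List.getElem_cons_succ] at h3
              rw [List.take_succ_cons, List.count_cons] at h3
              rw [List.count_append, List.count_singleton]
              by_cases hx : rs[k] = x <;> simp [hx] at h3 ⊢ <;> omega

-- lower bound on first components
lemma pvRefP_fst_lb (n : Int) (rest : List Int) : ∀ (s : Int) (pre : List Int) (p : Int × Int),
    p ∈ pvRefP n s pre rest → s ≤ p.1 := by
  intro s pre p hp
  obtain ⟨k, hk, h1, -, -⟩ := (mem_pvRefP n rest s pre p).mp hp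
  omega

lemma pvRefP_pairwise (n : Int) (rest : List Int) : ∀ (s : Int) (pre : List Int),
    (pvRefP n s pre rest).Pairwise (fun p q => p.1 < q.1) := by
  induction rest with
  | nil => intro s pre; simp [pvRefP]
  | cons x rs ih =>
      intro s pre
      rw [pvRefP, List.pairwise_append]
      refine ⟨?_, ih (s + 1) (pre ++ [x]), ?_⟩
      · split_ifs <;> simp
      · intro a ha b hb
        have hb' := pvRefP_fst_lb n rs (s + 1) (pre ++ [x]) b hb
        have ha' : a.1 = s := by
          split_ifs at ha with h
          · simpa using congrArg Prod.fst (List.mem_singleton.mp ha)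
          · simp at ha
        omega

-- the list of positions of x in array (as recorded by B's dict)
def pvOcc (array : List Int) (x : Int) : List Int :=
  ((PySem.List.enumerate array).filter (fun p => p.2 == x)).map (·.1)

lemma pvOcc_get (array : List Int) (x : Int) : ∀ (s : Int) (j : Nat) (i : Int),
    ((((PySem.List.enumerate array s).filter (fun p => p.2 == x)).map (·.1))[j]? = some i ↔
      ∃ k : Nat, ∃ hk : k < array.length,
        i = s + k ∧ array[k] = x ∧ (array.take (k + 1)).count x = j + 1) := by
  induction array with
  | nil => intro s j i; simp [PySem.List.enumerate_nil]
  | cons y ys ih =>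
      intro s j i
      rw [PySem.List.enumerate_cons, List.filter_cons]
      by_cases hyx : y = x
      · subst hyx
        simp only [beq_self_eq_true, if_pos, List.map_cons]
        cases j with
        | zero =>
            simp only [List.getElem?_cons_zero, Option.some_inj]
            constructor
            · rintro rfl
              exact ⟨0, by simp, by simp, by simp, by simp⟩
            · rintro ⟨k, hk, h1, h2, h3⟩
              cases k with
              | zero => simpa using h1.symm
              | succ k =>
                  exfalso
                  rw [List.take_succ_cons, List.count_cons] at h3
                  simp only [List.getElem_cons_succ] at h2
                  have hmem : y ∈ ys.take (k + 1) := by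
                    have hk' : k < ys.length := by simpa using hk
                    have : (ys.take (k + 1))[k]'(by simp; omega) = ys[k] := List.getElem_take
                    rw [← h2, ← this]
                    exact List.getElem_mem _
                  have := List.count_pos_iff.mpr hmem
                  simp at h3
                  omega
        | succ j =>
            rw [List.getElem?_cons_succ, ih (s + 1) j i]
            constructor
            · rintro ⟨k, hk, h1, h2, h3⟩
              refine ⟨k + 1, by simp; omega, by push_cast; omega, by simpa using h2, ?_⟩
              rw [List.take_succ_cons, List.count_cons]
              simp [h3]
            · rintro ⟨k, hk, h1, h2, h3⟩
              cases k with
              | zero =>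
                  exfalso
                  rw [List.take_succ_cons, List.take_zero] at h3
                  simp at h3
              | succ k =>
                  have hk' : k < ys.length := by simpa using hk
                  refine ⟨k, hk', by push_cast at h1 ⊢; omega, by simpa using h2, ?_⟩
                  rw [List.take_succ_cons, List.count_cons] at h3
                  simp only [List.getElem_cons_succ] at h2
                  simp at h3
                  omega
      · simp only [show (y == x) = false from beq_eq_false_iff_ne.mpr hyx, if_neg, Bool.false_eq_true,
          not_false_eq_true, ih (s + 1) j i]
        constructor
        · rintro ⟨k, hk, h1, h2, h3⟩
          refine ⟨k + 1, by simp; omega, by push_cast; omega, by simpa using h2, ?_⟩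
          rw [List.take_succ_cons, List.count_cons]
          simp [hyx, h3]
        · rintro ⟨k, hk, h1, h2, h3⟩
          cases k with
          | zero =>
              exfalso
              simp only [List.getElem_cons_zero] at h2
              exact hyx h2
          | succ k =>
              have hk' : k < ys.length := by simpa using hk
              refine ⟨k, hk', by push_cast at h1 ⊢; omega, by simpa using h2, ?_⟩
              rw [List.take_succ_cons, List.count_cons] at h3
              simp only [List.getElem_cons_succ] at h2
              simp [hyx] at h3
              ·  exact h3

-- the dict built by B has keys = distinct elements and getD x [] = pvOcc
lemma pvPos_getD (array : List Int) (x : Int) :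
    ((PySem.List.enumerate array).foldl (fun d p => d.modify p.2 [] (fun l => l ++ [p.1])) PySem.Dict.empty).getD x [] = pvOcc array x := by
  have hswap : (PySem.List.enumerate array).foldl
      (fun d p => d.modify p.2 [] (fun l => l ++ [p.1])) PySem.Dict.empty
      = ((PySem.List.enumerate array).map (fun p => (p.2, p.1))).foldl
          (fun d q => d.modify q.1 [] (fun l => l ++ [q.2])) PySem.Dict.empty := by
    rw [List.foldl_map]
  rw [hswap, PySem.Dict.getD_foldl_modify_append, PySem.Dict.getD_empty]
  simp [pvOcc, List.filter_map, List.map_map, Function.comp_def]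

lemma pvPos_keys (array : List Int) :
    ((PySem.List.enumerate array).foldl (fun d p => d.modify p.2 [] (fun l => l ++ [p.1])) PySem.Dict.empty).keys = PySem.Set.ofList array := by
  rw [PySem.Dict.keys_foldl_modify_key (PySem.List.enumerate array) (fun p => p.2) []
        (fun _ p => fun l => l ++ [p.1]) PySem.Dict.empty]
  rw [PySem.Dict.keys_empty, PySem.List.map_snd_enumerate]
  rfl

-- B's candidate pairs list, named for the proof
def pvPairs (array : List Int) (n : Int) : List (Int × Int) :=
  (((PySem.List.enumerate array).foldl (fun d p => d.modify p.2 [] (fun l => l ++ [p.1])) PySem.Dict.empty).items).filterMap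
    (fun q => if 1 ≤ n ∧ n ≤ (q.2.length : Int) then some (PySem.List.pyGetD q.2 (n - 1) 0, q.1) else none)

lemma pvPairs_mem (array : List Int) (n : Int) (p : Int × Int) :
    p ∈ pvPairs array n ↔ p ∈ pvRefP n 0 [] array := by
  have hnd : ((PySem.List.enumerate array).foldl (fun d p => d.modify p.2 [] (fun l => l ++ [p.1])) PySem.Dict.empty).keys.Nodup := by
    refine PySem.Dict.nodup_keys_foldl_modify_key (PySem.List.enumerate array) (fun p => p.2) []
      (fun _ p => fun l => l ++ [p.1]) PySem.Dict.empty ?_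
    exact PySem.Dict.nodup_keys_empty
  have hitems : ((PySem.List.enumerate array).foldl (fun d p => d.modify p.2 [] (fun l => l ++ [p.1])) PySem.Dict.empty).items
      = (PySem.Set.ofList array).map (fun x => (x, pvOcc array x)) := by
    rw [PySem.Dict.items_eq_map_keys _ hnd [], pvPos_keys]
    exact List.map_congr_left (fun x _ => by rw [pvPos_getD])
  have hocc : ∀ (x : Int) (j : Nat) (i : Int), (pvOcc array x)[j]? = some i ↔
      ∃ k : Nat, ∃ hk : k < array.length, i = (k : Int) ∧ array[k] = x ∧ (array.take (k + 1)).count x = j + 1 := by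
    intro x j i
    have h := pvOcc_get array x 0 j i
    simpa [pvOcc] using h
  unfold pvPairs
  rw [hitems, mem_pvRefP n array 0 [] p]
  simp only [List.mem_filterMap, List.mem_map]
  constructor
  · rintro ⟨q, ⟨x, hx, rfl⟩, hif⟩
    rw [PySem.Set.mem_ofList] at hx
    split_ifs at hif with hc
    · obtain ⟨hn1, hnlen⟩ := hc
      obtain rfl : (PySem.List.pyGetD (pvOcc array x) (n - 1) 0, x) = p := by
        simpa using hif
      have hnlen' : n ≤ ((pvOcc array x).length : Int) := by simpa using hnlen
      have hjlt : (n - 1).toNat < (pvOcc array x).length := by omega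
      have hget : PySem.List.pyGetD (pvOcc array x) (n - 1) 0 = (pvOcc array x)[(n - 1).toNat] :=
        PySem.List.pyGetD_eq_getElem _ _ (by omega) (by omega)
      obtain ⟨k, hk, hik, hxk, hcount⟩ := (hocc x (n - 1).toNat _).mp (List.getElem?_eq_getElem hjlt)
      refine ⟨k, hk, ?_, by simpa using hxk.symm, ?_⟩
      · simpa [hget] using hik
      · simp only [List.count_nil, hxk]
        push_cast [hcount]
        omega
  · rintro ⟨k, hk, h1, h2, h3⟩
    simp only [List.count_nil, Nat.cast_zero, zero_add] at h3
    have hcpos : 1 ≤ (array.take (k + 1)).count array[k] := by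
      refine List.count_pos_iff.mpr ?_
      have hgt : (array.take (k + 1))[k]'(by simp; omega) = array[k] := List.getElem_take
      rw [← hgt]; exact List.getElem_mem _
    have hn1 : 1 ≤ n := by omega
    have hsome : (pvOcc array (array[k]))[(n - 1).toNat]? = some (k : Int) := by
      refine (hocc (array[k]) (n - 1).toNat (k : Int)).mpr ⟨k, hk, rfl, rfl, ?_⟩
      omega
    have hjlt : (n - 1).toNat < (pvOcc array (array[k])).length :=
      (List.getElem?_eq_some_iff.mp hsome).1
    have hgetel : (pvOcc array (array[k]))[(n - 1).toNat] = (k : Int) :=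
      (List.getElem?_eq_some_iff.mp hsome).2
    refine ⟨(array[k], pvOcc array (array[k])), ⟨array[k], ?_, rfl⟩, ?_⟩
    · exact (PySem.Set.mem_ofList array _).mpr (List.getElem_mem hk)
    · rw [if_pos ⟨hn1, show n ≤ (((array[k], pvOcc array (array[k])).2.length : Nat) : Int) by simp only; omega⟩]
      have hget : PySem.List.pyGetD (pvOcc array (array[k])) (n - 1) 0 = (k : Int) := by
        rw [PySem.List.pyGetD_eq_getElem _ _ (by omega) (by omega), hgetel]
      rw [hget]
      rw [zero_add] at h1
      exact congrArg some (Prod.ext h1 h2).symm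

lemma pvFilterMap_snd (n : Int) (l : List (Int × List Int)) :
    ((l.filterMap (fun q => if 1 ≤ n ∧ n ≤ (q.2.length : Int) then some (PySem.List.pyGetD q.2 (n - 1) 0, q.1) else none)).map (·.2))
      = (l.filter (fun q => decide (1 ≤ n ∧ n ≤ (q.2.length : Int)))).map (·.1) := by
  induction l with
  | nil => simp
  | cons q l ih =>
      rw [List.filterMap_cons, List.filter_cons]
      by_cases h : 1 ≤ n ∧ n ≤ (q.2.length : Int)
      · rw [if_pos h, if_pos (by simpa using h)]; simp [ih]
      · rw [if_neg h, if_neg (by simpa using h)]; exact ih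

lemma pvPairs_nodup (array : List Int) (n : Int) : (pvPairs array n).Nodup := by
  refine List.Nodup.of_map (·.2) ?_
  unfold pvPairs
  rw [pvFilterMap_snd]
  have hnd : ((PySem.List.enumerate array).foldl (fun d p => d.modify p.2 [] (fun l => l ++ [p.1])) PySem.Dict.empty).keys.Nodup := by
    refine PySem.Dict.nodup_keys_foldl_modify_key (PySem.List.enumerate array) (fun p => p.2) []
      (fun _ p => fun l => l ++ [p.1]) PySem.Dict.empty ?_
    exact PySem.Dict.nodup_keys_empty
  refine List.Nodup.sublist ?_ (by simpa [PySem.Dict.keys] using hnd)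
  exact List.filter_sublist.map _

lemma pvRefP_nodup (n s : Int) (pre rest : List Int) : (pvRefP n s pre rest).Nodup := by
  exact (pvRefP_pairwise n rest s pre).imp (fun h => by rintro rfl; exact lt_irrefl _ h)

lemma pvSorted_pairs (array : List Int) (n : Int) :
    PySem.List.sorted (pvPairs array n) (fun p => p.1) = pvRefP n 0 [] array := by
  refine PySem.List.sorted_eq_of_perm_of_pairwise_lt _ _ _ ?_ (pvRefP_pairwise n array 0 [])
  exact (List.perm_ext_iff_of_nodup (pvRefP_nodup n 0 [] array) (pvPairs_nodup array n)).mpr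
    (fun p => (pvPairs_mem array n p).symm)

-- ===== VERDICT (by name: the statement is the Claim_ definition above) =====
theorem get_met_n_spec : Claim_equal_get_met_n := by
  intro array n _
  unfold Spec_get_met_n get_met_n get_met_n_alt
  rw [pvLoopA n array 0 [] PySem.Dict.empty [] (by intro v; simp [PySem.Dict.getD_empty])]
  show (pvRefP n 0 [] array).map (·.2) = (PySem.List.sorted (pvPairs array n) (fun p => p.1) false).map (fun p => p.2)
  rw [pvSorted_pairs array n]
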